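-- pv_equiv track=rewrite | github.com/SWeszler/programming_problems | greedy/alien_piano/alien_piano.py | alien_piano
-- ===== SOURCE A (Python) =====
-- def alien_piano(K, notes):
--   A = [notes[i] for i in range(K) if i == 0 or notes[i - 1] != notes[i]]
--   up_count = 0
--   down_count = 0
--   violations = 0
--
--   for i in range(1, len(A)):
--     if A[i] > A[i - 1]:
--       up_count += 1
--       down_count = 0
--     else:
--       down_count += 1
--       up_count = 0
--     if up_count > 3 or down_count > 3:
--       violations += 1
--       up_count = down_count = 0
--   return violations
-- ===== SOURCE B (Python) =====
-- def alien_piano(K, notes):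
--   A = [notes[i] for i in range(K) if i == 0 or notes[i - 1] != notes[i]]
--   dirs = [cur > prev for prev, cur in zip(A, A[1:])]
--   breaks = [0] + [i for i in range(1, len(dirs)) if dirs[i] != dirs[i - 1]] + [len(dirs)]
--   return sum((b - a) // 4 for a, b in zip(breaks, breaks[1:]))
-- ===== Notes on version B (the rewrite author's own statement) =====
-- stated objective: alternative
-- what changed: B replaces A's online scan with two incrementally reset up/down counters by staged passes: it materialises the step-direction list, collects the indices where the direction changes, and sums (b - a) // 4 over consecutive boundary indices, so run lengths come from index arithmetic instead of maintained counters.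
import Mathlib
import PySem

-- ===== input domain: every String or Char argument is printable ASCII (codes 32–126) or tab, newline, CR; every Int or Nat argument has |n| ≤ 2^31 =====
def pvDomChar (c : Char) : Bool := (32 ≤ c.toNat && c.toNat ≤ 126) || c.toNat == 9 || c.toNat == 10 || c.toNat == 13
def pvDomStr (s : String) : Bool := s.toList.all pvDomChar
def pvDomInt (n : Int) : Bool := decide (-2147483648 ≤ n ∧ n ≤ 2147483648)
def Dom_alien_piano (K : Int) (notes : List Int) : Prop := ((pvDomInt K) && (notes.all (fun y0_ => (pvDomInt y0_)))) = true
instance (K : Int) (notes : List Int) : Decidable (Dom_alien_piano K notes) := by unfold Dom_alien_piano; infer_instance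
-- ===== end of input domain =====

-- B replaces A's online scan with incrementally reset up/down counters by staged passes:
-- direction list, then the boundary indices where the direction changes, then the sum of
-- (b - a) // 4 over consecutive boundary indices (objective: alternative).

-- ===== PORT A =====
-- shared helper: the dedup comprehension 'A = [notes[i] for i in range(K) if i == 0 or notes[i-1] != notes[i]]'
-- (an identical line in both Pythons); pyGetD with default 0 is exact here since Pre_ puts every index in range
def pvDedup (K : Int) (notes : List Int) : List Int :=
  ((PySem.List.pyRange 0 K 1).filter (fun i =>
      i == 0 || !(PySem.List.pyGetD notes (i - 1) 0 == PySem.List.pyGetD notes i 0))).map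
    (fun i => PySem.List.pyGetD notes i 0)

-- one iteration of A's loop body, given prev = A[i-1], cur = A[i]; state (up_count, down_count, violations)
def alienStepA (st : Int × Int × Int) (prev cur : Int) : Int × Int × Int :=
  let s1 := if cur > prev then (st.1 + 1, (0 : Int), st.2.2) else ((0 : Int), st.2.1 + 1, st.2.2)
  if s1.1 > 3 || s1.2.1 > 3 then (0, 0, s1.2.2 + 1) else s1

def alien_piano (K : Int) (notes : List Int) : Int :=
  let A := pvDedup K notes
  ((PySem.List.pyRange 1 (A.length : Int) 1).foldl
      (fun st i => alienStepA st (PySem.List.pyGetD A (i - 1) 0) (PySem.List.pyGetD A i 0))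
      (0, 0, 0)).2.2

-- ===== PORT B =====
def alien_piano_alt (K : Int) (notes : List Int) : Int :=
  let A := pvDedup K notes
  let dirs : List Bool := (A.zip (PySem.List.slice A (some 1) none)).map (fun p => decide (p.2 > p.1))
  let breaks : List Int :=
    (0 : Int) :: ((PySem.List.pyRange 1 (dirs.length : Int) 1).filter
        (fun i => !(PySem.List.pyGetD dirs i false == PySem.List.pyGetD dirs (i - 1) false)))
      ++ [(dirs.length : Int)]
  ((breaks.zip (PySem.List.slice breaks (some 1) none)).map
      (fun p => PySem.Int.floordiv (p.2 - p.1) 4)).sum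

-- ===== PRECONDITION & SPEC =====
-- Pre_ excludes exactly the inputs where A raises IndexError: K exceeding len(notes)
def Pre_alien_piano (K : Int) (notes : List Int) : Prop := K ≤ (notes.length : Int)
instance (K : Int) (notes : List Int) : Decidable (Pre_alien_piano K notes) := by
  unfold Pre_alien_piano; infer_instance

def pvWitness_alien_piano : Int × List Int := (6, [1, 2, 3, 4, 5, 1])

def Spec_alien_piano (K : Int) (notes : List Int) (out : Int) : Prop := out = alien_piano_alt K notes
instance (K : Int) (notes : List Int) (out : Int) : Decidable (Spec_alien_piano K notes out) := by
  unfold Spec_alien_piano; infer_instance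

-- ===== CLAIM (what is proved, stated in full; the proofs are below) =====
def Claim_equal_alien_piano : Prop := ∀ (K : Int) (notes : List Int), Dom_alien_piano K notes → Pre_alien_piano K notes → Spec_alien_piano K notes (alien_piano K notes)

-- ===== LEMMAS AND PROOFS =====

-- A's loop body as a function of the step direction only
def stepAD (st : Int × Int × Int) (c : Bool) : Int × Int × Int :=
  let s1 := if c then (st.1 + 1, (0 : Int), st.2.2) else ((0 : Int), st.2.1 + 1, st.2.2)
  if s1.1 > 3 || s1.2.1 > 3 then (0, 0, s1.2.2 + 1) else s1

-- proof-only reference machine: state (violations, direction, run length)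
def stepD (st : Int × Int × Int) (c : Bool) : Int × Int × Int :=
  let d : Int := if c then 1 else -1
  if d == st.2.1 then (st.1, st.2.1, st.2.2 + 1)
  else (st.1 + PySem.Int.floordiv st.2.2 4, d, 1)

-- relative indices (within the tail of the direction list) at which the direction changes
def pvCf (p : Bool) : List Bool → List Int
  | [] => []
  | c :: t => (if c != p then [(0 : Int)] else []) ++ (pvCf c t).map (· + 1)

-- sum of (b - a) // 4 over consecutive elements, 'a' seeded
def pvPs (a : Int) : List Int → Int
  | [] => 0
  | b :: t => PySem.Int.floordiv (b - a) 4 + pvPs b t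

-- A's counter state as a function of (direction, run length)
def pvUpOf (dir run : Int) : Int := if dir = 1 then PySem.Int.mod run 4 else 0
def pvDownOf (dir run : Int) : Int := if dir = 1 then 0 else PySem.Int.mod run 4

lemma pvGetD_cons_succ {α : Type} [Inhabited α] (x : α) (l : List α) (df : α) (i : Int) (h : 1 ≤ i) :
    PySem.List.pyGetD (x :: l) i df = PySem.List.pyGetD l (i - 1) df := by
  unfold PySem.List.pyGetD PySem.List.pyGet? PySem.List.pyIdx?
  have h0 : 0 ≤ i := by omega
  have h1 : 0 ≤ i - 1 := by omega
  rw [if_pos h0, if_pos h1]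
  by_cases h2 : i < (((x :: l).length : Nat) : Int)
  · have h3 : i - 1 < ((l.length : Nat) : Int) := by simp at h2 ⊢; omega
    rw [if_pos h2, if_pos h3]
    have : i.toNat = (i - 1).toNat + 1 := by omega
    rw [this]; rfl
  · have h3 : ¬ (i - 1 < ((l.length : Nat) : Int)) := by simp at h2 ⊢; omega
    rw [if_neg h2, if_neg h3]; rfl

lemma pvRange_shift (a b : Int) :
    PySem.List.pyRange (a + 1) (b + 1) 1 = (PySem.List.pyRange a b 1).map (· + 1) := by
  rw [PySem.List.pyRange_one, PySem.List.pyRange_one]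
  have : b + 1 - (a + 1) = b - a := by ring
  rw [this, List.map_map]
  exact List.map_congr_left (fun k _ => by simp; ring)

-- A's index loop over A is a fold over the list of consecutive pairs of A
lemma pv_idx_fold {S : Type} (f : S → Int → Int → S) :
    ∀ (ys : List Int) (x : Int) (init : S),
    (PySem.List.pyRange 1 (((x :: ys).length : Nat) : Int) 1).foldl
        (fun st i => f st (PySem.List.pyGetD (x :: ys) (i - 1) 0) (PySem.List.pyGetD (x :: ys) i 0)) init
      = ((x :: ys).zip ys).foldl (fun st p => f st p.1 p.2) init := by
  intro ys
  induction ys with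
  | nil => intro x init; simp [PySem.List.pyRange_one_eq_nil]
  | cons y ys ih =>
    intro x init
    have hlen : (((x :: y :: ys).length : Nat) : Int) = ((((y :: ys).length : Nat) : Int)) + 1 := by
      push_cast [List.length_cons]; ring
    rw [hlen, PySem.List.pyRange_one_cons (by push_cast [List.length_cons]; omega)]
    simp only [List.foldl_cons]
    have e1 : PySem.List.pyGetD (x :: y :: ys) (1 - 1) 0 = x := by simp [pysem]
    have e2 : PySem.List.pyGetD (x :: y :: ys) 1 0 = y := by simp [pysem]
    rw [e1, e2]
    have hsh : PySem.List.pyRange (1 + 1) ((((y :: ys).length : Nat) : Int) + 1) 1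
        = (PySem.List.pyRange 1 (((y :: ys).length : Nat) : Int) 1).map (· + 1) :=
      pvRange_shift 1 _
    rw [hsh, List.foldl_map]
    have hcg : (PySem.List.pyRange 1 (((y :: ys).length : Nat) : Int) 1).foldl
        (fun st i => f st (PySem.List.pyGetD (x :: y :: ys) (i + 1 - 1) 0)
          (PySem.List.pyGetD (x :: y :: ys) (i + 1) 0)) (f init x y)
      = (PySem.List.pyRange 1 (((y :: ys).length : Nat) : Int) 1).foldl
        (fun st i => f st (PySem.List.pyGetD (y :: ys) (i - 1) 0)
          (PySem.List.pyGetD (y :: ys) i 0)) (f init x y) := by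
      apply PySem.List.foldl_congr_mem
      intro acc i hi
      have h1 : 1 ≤ i := (PySem.List.mem_pyRange_one.mp hi).1
      have g1 : PySem.List.pyGetD (x :: y :: ys) (i + 1 - 1) 0
          = PySem.List.pyGetD (y :: ys) (i - 1) 0 := by
        have : i + 1 - 1 = i := by ring
        rw [this, pvGetD_cons_succ _ _ _ _ h1]
      have g2 : PySem.List.pyGetD (x :: y :: ys) (i + 1) 0
          = PySem.List.pyGetD (y :: ys) i 0 := by
        rw [pvGetD_cons_succ _ _ _ _ (by omega)]
        congr 1; ring
      rw [g1, g2]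
    rw [hcg, ih y (f init x y)]
    rfl

lemma pv_stepA_dir (st : Int × Int × Int) (prev cur : Int) :
    alienStepA st prev cur = stepAD st (decide (cur > prev)) := by
  by_cases h : cur > prev <;> simp [alienStepA, stepAD, h]

-- one step, same direction as the current run (upward)
lemma pv_step_match_up (run viol : Int) :
    stepAD (pvUpOf 1 run, pvDownOf 1 run, viol + PySem.Int.floordiv run 4) true
      = (pvUpOf 1 (run + 1), pvDownOf 1 (run + 1), viol + PySem.Int.floordiv (run + 1) 4) := by
  have hm := PySem.Int.mod_eq_emod_of_pos (a := run) (b := 4) (by norm_num)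
  have hm1 := PySem.Int.mod_eq_emod_of_pos (a := run + 1) (b := 4) (by norm_num)
  have hq := PySem.Int.floordiv_eq_ediv_of_pos (a := run) (b := 4) (by norm_num)
  have hq1 := PySem.Int.floordiv_eq_ediv_of_pos (a := run + 1) (b := 4) (by norm_num)
  simp only [stepAD, pvUpOf, pvDownOf, hm, hm1, hq, hq1, if_true]
  by_cases h3 : run % 4 + 1 > 3
  · rw [if_pos (by simp; omega)]
    refine Prod.ext ?_ (Prod.ext ?_ ?_) <;> simp <;> omega
  · rw [if_neg (by simp; omega)]
    refine Prod.ext ?_ (Prod.ext ?_ ?_) <;> simp <;> omega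

-- one step, same direction as the current run (downward)
lemma pv_step_match_down (run viol : Int) :
    stepAD (pvUpOf (-1) run, pvDownOf (-1) run, viol + PySem.Int.floordiv run 4) false
      = (pvUpOf (-1) (run + 1), pvDownOf (-1) (run + 1), viol + PySem.Int.floordiv (run + 1) 4) := by
  have hm := PySem.Int.mod_eq_emod_of_pos (a := run) (b := 4) (by norm_num)
  have hm1 := PySem.Int.mod_eq_emod_of_pos (a := run + 1) (b := 4) (by norm_num)
  have hq := PySem.Int.floordiv_eq_ediv_of_pos (a := run) (b := 4) (by norm_num)
  have hq1 := PySem.Int.floordiv_eq_ediv_of_pos (a := run + 1) (b := 4) (by norm_num)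
  simp only [stepAD, pvUpOf, pvDownOf, hm, hm1, hq, hq1, Bool.false_eq_true, if_false]
  by_cases h3 : run % 4 + 1 > 3
  · rw [if_pos (by simp; omega)]
    refine Prod.ext ?_ (Prod.ext ?_ ?_) <;> simp <;> omega
  · rw [if_neg (by simp; omega)]
    refine Prod.ext ?_ (Prod.ext ?_ ?_) <;> simp <;> omega

-- one step that starts a new upward run (previous direction was downward)
lemma pv_step_new_up (run viol : Int) :
    stepAD (pvUpOf (-1) run, pvDownOf (-1) run, viol + PySem.Int.floordiv run 4) true
      = (pvUpOf 1 1, pvDownOf 1 1, (viol + PySem.Int.floordiv run 4) + PySem.Int.floordiv 1 4) := by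
  have m1 : PySem.Int.mod 1 4 = 1 := by decide
  have f1 : PySem.Int.floordiv 1 4 = 0 := by decide
  simp only [stepAD, pvUpOf, pvDownOf, m1, f1]
  norm_num

-- one step that starts a new downward run (previous direction was upward)
lemma pv_step_new_down (run viol : Int) :
    stepAD (pvUpOf 1 run, pvDownOf 1 run, viol + PySem.Int.floordiv run 4) false
      = (pvUpOf (-1) 1, pvDownOf (-1) 1, (viol + PySem.Int.floordiv run 4) + PySem.Int.floordiv 1 4) := by
  have m1 : PySem.Int.mod 1 4 = 1 := by decide
  have f1 : PySem.Int.floordiv 1 4 = 0 := by decide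
  simp only [stepAD, pvUpOf, pvDownOf, m1, f1]
  norm_num

-- the loop invariant: A's state is (pvUpOf dir run, pvDownOf dir run, viol + run // 4)
lemma pv_loop_equiv :
    ∀ (cs : List Bool) (dir run viol : Int), dir = 1 ∨ dir = -1 →
    (cs.foldl stepAD (pvUpOf dir run, pvDownOf dir run, viol + PySem.Int.floordiv run 4)).2.2
      = (cs.foldl stepD (viol, dir, run)).1
        + PySem.Int.floordiv (cs.foldl stepD (viol, dir, run)).2.2 4 := by
  intro cs
  induction cs with
  | nil => intro dir run viol _; rfl
  | cons c cs ih =>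
    intro dir run viol hx
    simp only [List.foldl_cons]
    rcases hx with hd | hd <;> subst hd <;> cases c
    · rw [pv_step_new_down run viol]
      have hb : stepD (viol, 1, run) false = (viol + PySem.Int.floordiv run 4, -1, 1) := by
        simp [stepD]
      rw [hb]
      exact ih (-1) 1 (viol + PySem.Int.floordiv run 4) (Or.inr rfl)
    · rw [pv_step_match_up run viol]
      have hb : stepD (viol, 1, run) true = (viol, 1, run + 1) := by simp [stepD]
      rw [hb]
      exact ih 1 (run + 1) viol (Or.inl rfl)
    · rw [pv_step_match_down run viol]
      have hb : stepD (viol, -1, run) false = (viol, -1, run + 1) := by simp [stepD]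
      rw [hb]
      exact ih (-1) (run + 1) viol (Or.inr rfl)
    · rw [pv_step_new_up run viol]
      have hb : stepD (viol, -1, run) true = (viol + PySem.Int.floordiv run 4, 1, 1) := by
        simp [stepD]
      rw [hb]
      exact ih 1 1 (viol + PySem.Int.floordiv run 4) (Or.inl rfl)

-- boundary-sum = reference machine, generalised over the position i of the next step
-- and the position a where the current run started
lemma pv_ps_cf :
    ∀ (rest : List Bool) (p : Bool) (a i v : Int),
    pvPs a ((pvCf p rest).map (· + i) ++ [i + (rest.length : Int)]) + v
      = (rest.foldl stepD (v, (if p then (1 : Int) else -1), i - a)).1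
        + PySem.Int.floordiv (rest.foldl stepD (v, (if p then (1 : Int) else -1), i - a)).2.2 4 := by
  intro rest
  induction rest with
  | nil =>
    intro p a i v
    simp only [pvCf, List.map_nil, List.nil_append, List.length_nil, Int.natCast_zero,
      add_zero, pvPs, List.foldl_nil]
    ring
  | cons c t ih =>
    intro t_p a i v
    have hmm : ((pvCf c t).map (· + 1)).map (· + i) = (pvCf c t).map (· + (i + 1)) := by
      rw [List.map_map]; exact List.map_congr_left (fun x _ => by simp; ring)
    have hlen : i + ((c :: t).length : Int) = (i + 1) + (t.length : Int) := by
      push_cast [List.length_cons]; ring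
    by_cases hc : c = t_p
    · subst hc
      have hcf : pvCf c (c :: t) = (pvCf c t).map (· + 1) := by simp [pvCf]
      rw [hcf, hmm, hlen]
      have hst : stepD (v, (if c then (1 : Int) else -1), i - a) c
          = (v, (if c then (1 : Int) else -1), (i + 1) - a) := by
        cases c <;> simp [stepD] <;> ring
      simp only [List.foldl_cons, hst]
      exact ih c a (i + 1) v
    · have hcf : pvCf t_p (c :: t) = 0 :: (pvCf c t).map (· + 1) := by
        simp [pvCf, bne_iff_ne, hc]
      rw [hcf]
      simp only [List.map_cons, List.cons_append, pvPs]
      rw [hmm, hlen]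
      have hst : stepD (v, (if t_p then (1 : Int) else -1), i - a) c
          = (v + PySem.Int.floordiv (i - a) 4, (if c then (1 : Int) else -1), 1) := by
        cases c <;> cases t_p <;> simp_all [stepD]
      simp only [List.foldl_cons, hst]
      have h0 : (0 : Int) + i = i := by ring
      rw [h0]
      have hih := ih c i (i + 1) (v + PySem.Int.floordiv (i - a) 4)
      have h1 : i + 1 - i = (1 : Int) := by ring
      rw [h1] at hih
      rw [show PySem.Int.floordiv (i - a) 4
            + pvPs i ((pvCf c t).map (· + (i + 1)) ++ [i + 1 + (t.length : Int)]) + v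
          = pvPs i ((pvCf c t).map (· + (i + 1)) ++ [i + 1 + (t.length : Int)])
            + (v + PySem.Int.floordiv (i - a) 4) from by ring]
      exact hih

-- the filter over global indices is pvCf shifted by one
lemma pv_changes_eq :
    ∀ (t : List Bool) (c : Bool),
    (PySem.List.pyRange 1 (((c :: t).length : Nat) : Int) 1).filter
        (fun i => !(PySem.List.pyGetD (c :: t) i false == PySem.List.pyGetD (c :: t) (i - 1) false))
      = (pvCf c t).map (· + 1) := by
  intro t
  induction t with
  | nil =>
    intro c
    simp [pvCf, PySem.List.pyRange_one_eq_nil]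
  | cons c2 t ih =>
    intro c
    have hlen : (((c :: c2 :: t).length : Nat) : Int) = ((((c2 :: t).length : Nat) : Int)) + 1 := by
      push_cast [List.length_cons]; ring
    rw [hlen, PySem.List.pyRange_one_cons (by push_cast [List.length_cons]; omega)]
    rw [List.filter_cons]
    have e1 : PySem.List.pyGetD (c :: c2 :: t) 1 false = c2 := by simp [pysem]
    have e0 : PySem.List.pyGetD (c :: c2 :: t) (1 - 1) false = c := by simp [pysem]
    rw [e1, e0]
    have hsh : PySem.List.pyRange (1 + 1) ((((c2 :: t).length : Nat) : Int) + 1) 1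
        = (PySem.List.pyRange 1 (((c2 :: t).length : Nat) : Int) 1).map (· + 1) :=
      pvRange_shift 1 _
    rw [hsh, List.filter_map]
    have hcg : (PySem.List.pyRange 1 (((c2 :: t).length : Nat) : Int) 1).filter
        ((fun i => !(PySem.List.pyGetD (c :: c2 :: t) i false
            == PySem.List.pyGetD (c :: c2 :: t) (i - 1) false)) ∘ (· + 1))
      = (PySem.List.pyRange 1 (((c2 :: t).length : Nat) : Int) 1).filter
        (fun i => !(PySem.List.pyGetD (c2 :: t) i false
            == PySem.List.pyGetD (c2 :: t) (i - 1) false)) := by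
      apply List.filter_congr
      intro i hi
      have h1 : 1 ≤ i := (PySem.List.mem_pyRange_one.mp hi).1
      have g1 : PySem.List.pyGetD (c :: c2 :: t) (i + 1) false
          = PySem.List.pyGetD (c2 :: t) i false := by
        rw [pvGetD_cons_succ _ _ _ _ (by omega)]; congr 1; ring
      have g0 : PySem.List.pyGetD (c :: c2 :: t) (i + 1 - 1) false
          = PySem.List.pyGetD (c2 :: t) (i - 1) false := by
        have : i + 1 - 1 = i := by ring
        rw [this, pvGetD_cons_succ _ _ _ _ h1]
      simp only [Function.comp_apply, g1, g0]
    rw [hcg, ih c2]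
    by_cases h : c2 = c
    · subst h
      simp [pvCf]
    · have : (!(c2 == c)) = true := by simp [h]
      rw [this]
      simp only [pvCf, bne_iff_ne, ne_eq, h, not_false_eq_true, if_pos, List.singleton_append,
        List.map_cons, List.map_map]
      norm_num

-- the zip-with-tail sum is pvPs
lemma pv_zip_sum :
    ∀ (L : List Int) (a : Int),
    (((a :: L).zip L).map (fun p => PySem.Int.floordiv (p.2 - p.1) 4)).sum = pvPs a L := by
  intro L
  induction L with
  | nil => intro a; rfl
  | cons b t ih =>
    intro a
    simp only [List.zip_cons_cons, List.map_cons, List.sum_cons, pvPs]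
    rw [ih b]

-- ===== VERDICT (by name: the statement is the Claim_ definition above) =====
theorem alien_piano_spec : Claim_equal_alien_piano := by
  intro K notes _ _
  unfold Spec_alien_piano
  dsimp only [alien_piano, alien_piano_alt]
  generalize pvDedup K notes = A
  cases A with
  | nil => decide
  | cons x ys =>
    simp only [PySem.List.slice_from_one, List.tail_cons]
    rw [pv_idx_fold (fun st prev cur => alienStepA st prev cur) ys x]
    have hmap : ((x :: ys).zip ys).foldl (fun st p => alienStepA st p.1 p.2) ((0 : Int), (0 : Int), (0 : Int))
        = (((x :: ys).zip ys).map (fun p => decide (p.2 > p.1))).foldl stepAD (0, 0, 0) := by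
      rw [List.foldl_map]
      apply PySem.List.foldl_congr_mem
      intro st p _
      exact pv_stepA_dir st p.1 p.2
    rw [hmap]
    generalize hd : ((x :: ys).zip ys).map (fun p => decide (p.2 > p.1)) = dirs
    cases dirs with
    | nil => decide
    | cons c rest =>
      -- B side: rewrite breaks through pv_changes_eq and pv_zip_sum, then pv_ps_cf
      rw [pv_changes_eq rest c]
      simp only [List.cons_append, List.tail_cons]
      rw [pv_zip_sum ((pvCf c rest).map (· + 1) ++ [(((c :: rest).length : Nat) : Int)]) 0]
      -- A side: peel the first step, then the invariant
      simp only [List.foldl_cons]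
      have hfirst : stepAD ((0 : Int), (0 : Int), (0 : Int)) c
          = (pvUpOf (if c then 1 else -1) 1, pvDownOf (if c then 1 else -1) 1,
             (0 : Int) + PySem.Int.floordiv 1 4) := by
        cases c <;> decide
    -- invariant on the tail
      rw [hfirst, pv_loop_equiv rest (if c then 1 else -1) 1 0 (by cases c <;> simp)]
      -- boundary sum on the other side
      have hps := pv_ps_cf rest c 0 1 0
      have hlen2 : (((c :: rest).length : Nat) : Int) = 1 + (rest.length : Int) := by
        push_cast [List.length_cons]; ring
      rw [hlen2]
      have h10 : (1 : Int) - 0 = 1 := by ring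
      rw [h10] at hps
      rw [show (rest.foldl stepD (0, if c = true then (1 : Int) else -1, 1)).1
            = (rest.foldl stepD ((0 : Int), (if c then (1 : Int) else -1), 1)).1 from rfl] at hps ⊢
      rw [← hps]
      ring
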